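-- pv_equiv track=rewrite | github.com/aeabijl/advent-of-code-2023 | day11/script2.py | calculate_shortest_path
-- ===== SOURCE A (Python) =====
-- def calculate_shortest_path(star, expand_level, empty_rows, empty_columns):
--     start_star_y, start_star_x = star[0]
--     end_star_y, end_star_x = star[1]
--     y, x = abs(start_star_y - end_star_y), abs(start_star_x - end_star_x)
--     for row in empty_rows:
--         if row in range(*sorted((start_star_y, end_star_y))):
--             y += expand_level
--     for column in empty_columns:
--         if column in range(*sorted((start_star_x, end_star_x))):
--             x += expand_level
--     return y + x
-- ===== SOURCE B (Python) =====
-- def _bisect_left(a, x):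
--     lo, hi = 0, len(a)
--     while lo < hi:
--         mid = (lo + hi) // 2
--         if a[mid] < x:
--             lo = mid + 1
--         else:
--             hi = mid
--     return lo
--
--
-- def calculate_shortest_path(star, expand_level, empty_rows, empty_columns):
--     sy, sx = star[0]
--     ey, ex = star[1]
--     rows = sorted(empty_rows)
--     cols = sorted(empty_columns)
--     lo_y, hi_y = (sy, ey) if sy <= ey else (ey, sy)
--     lo_x, hi_x = (sx, ex) if sx <= ex else (ex, sx)
--     ry = _bisect_left(rows, hi_y) - _bisect_left(rows, lo_y)
--     rx = _bisect_left(cols, hi_x) - _bisect_left(cols, lo_x)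
--     return (hi_y - lo_y) + (hi_x - lo_x) + expand_level * (ry + rx)
-- ===== Notes on version B (the rewrite author's own statement) =====
-- stated objective: faster
-- what changed: B replaces A's per-element linear scans over empty_rows/empty_columns (building a range object and testing membership for each entry) by sorting each list once and counting the entries inside the open interval as a difference of two binary searches (bisect_left).
import Mathlib
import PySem

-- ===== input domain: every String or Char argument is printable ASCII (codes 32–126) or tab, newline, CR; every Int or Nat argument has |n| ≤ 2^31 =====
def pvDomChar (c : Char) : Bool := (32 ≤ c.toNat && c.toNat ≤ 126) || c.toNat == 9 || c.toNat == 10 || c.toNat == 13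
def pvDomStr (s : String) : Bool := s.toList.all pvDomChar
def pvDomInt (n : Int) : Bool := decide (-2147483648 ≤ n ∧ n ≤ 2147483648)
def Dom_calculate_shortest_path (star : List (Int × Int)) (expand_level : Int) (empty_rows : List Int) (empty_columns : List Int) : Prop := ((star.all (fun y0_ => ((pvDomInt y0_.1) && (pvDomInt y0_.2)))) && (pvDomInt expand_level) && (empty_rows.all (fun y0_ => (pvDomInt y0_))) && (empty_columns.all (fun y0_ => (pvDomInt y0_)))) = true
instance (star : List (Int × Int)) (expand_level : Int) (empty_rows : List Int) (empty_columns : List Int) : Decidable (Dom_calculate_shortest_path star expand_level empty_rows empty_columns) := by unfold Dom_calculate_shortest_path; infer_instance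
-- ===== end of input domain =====

-- B sorts each empty list once and counts the entries in the open interval by a
-- difference of two binary searches instead of A's per-element membership scans
-- (measurably faster by a constant factor on large lists).

-- ===== PORT A =====
-- 'row in range(*sorted((a, b)))' means min a b ≤ row < max a b; the sorted 2-tuple
-- is ported as the conditional swap, range membership as the two comparisons (exact).
def calculate_shortest_path (star : List (Int × Int)) (expand_level : Int) (empty_rows : List Int) (empty_columns : List Int) : Int :=
  -- star[0] / star[1] are Python indexing: PySem.List.pyGet?; none = IndexError (excluded by Pre_)
  match PySem.List.pyGet? star 0, PySem.List.pyGet? star 1 with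
  | some (start_star_y, start_star_x), some (end_star_y, end_star_x) =>
    let y0 : Int := |start_star_y - end_star_y|
    let x0 : Int := |start_star_x - end_star_x|
    let pY := if start_star_y ≤ end_star_y then (start_star_y, end_star_y) else (end_star_y, start_star_y)
    let pX := if start_star_x ≤ end_star_x then (start_star_x, end_star_x) else (end_star_x, start_star_x)
    let y := empty_rows.foldl (fun y row => if pY.1 ≤ row ∧ row < pY.2 then y + expand_level else y) y0
    let x := empty_columns.foldl (fun x column => if pX.1 ≤ column ∧ column < pX.2 then x + expand_level else x) x0
    y + x
  | _, _ => 0  -- unreachable under Pre_: Python raises IndexError when len(star) < 2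

-- ===== PORT B =====
-- Source B's hand-written _bisect_left is exactly bisect.bisect_left, ported as the
-- prelude's PySem.List.bisectLeft (the prelude owns this primitive).
def calculate_shortest_path_alt (star : List (Int × Int)) (expand_level : Int) (empty_rows : List Int) (empty_columns : List Int) : Int :=
  match star with
  | (sy, sx) :: (ey, ex) :: _ =>
    let rows := PySem.List.sorted empty_rows (fun r => r) false
    let cols := PySem.List.sorted empty_columns (fun c => c) false
    let loY := if sy ≤ ey then sy else ey
    let hiY := if sy ≤ ey then ey else sy
    let loX := if sx ≤ ex then sx else ex
    let hiX := if sx ≤ ex then ex else sx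
    let ry : Int := (PySem.List.bisectLeft rows hiY : Int) - (PySem.List.bisectLeft rows loY : Int)
    let rx : Int := (PySem.List.bisectLeft cols hiX : Int) - (PySem.List.bisectLeft cols loX : Int)
    (hiY - loY) + (hiX - loX) + expand_level * (ry + rx)
  | _ => 0  -- unreachable under Pre_: Source B raises IndexError when len(star) < 2

-- ===== PRECONDITION & SPEC =====
-- Pre_ excludes exactly the inputs where Python A raises IndexError: star must have at least two entries.
def Pre_calculate_shortest_path (star : List (Int × Int)) (expand_level : Int) (empty_rows : List Int) (empty_columns : List Int) : Prop := 2 ≤ star.length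
instance (star : List (Int × Int)) (expand_level : Int) (empty_rows : List Int) (empty_columns : List Int) : Decidable (Pre_calculate_shortest_path star expand_level empty_rows empty_columns) := by unfold Pre_calculate_shortest_path; infer_instance

def pvWitness_calculate_shortest_path : (List (Int × Int)) × Int × List Int × List Int := ([(0, 0), (3, 5)], 2, [1, 2], [4])

def Spec_calculate_shortest_path (star : List (Int × Int)) (expand_level : Int) (empty_rows : List Int) (empty_columns : List Int) (out : Int) : Prop := out = calculate_shortest_path_alt star expand_level empty_rows empty_columns
instance (star : List (Int × Int)) (expand_level : Int) (empty_rows : List Int) (empty_columns : List Int) (out : Int) : Decidable (Spec_calculate_shortest_path star expand_level empty_rows empty_columns out) := by unfold Spec_calculate_shortest_path; infer_instance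

-- ===== CLAIM (what is proved, stated in full; the proofs are below) =====
def Claim_equal_calculate_shortest_path : Prop := ∀ (star : List (Int × Int)) (expand_level : Int) (empty_rows : List Int) (empty_columns : List Int), Dom_calculate_shortest_path star expand_level empty_rows empty_columns → Pre_calculate_shortest_path star expand_level empty_rows empty_columns → Spec_calculate_shortest_path star expand_level empty_rows empty_columns (calculate_shortest_path star expand_level empty_rows empty_columns)

-- ===== LEMMAS AND PROOFS =====

-- If the first k elements are < x and the rest are ≥ x, the count of elements < x is k.
lemma countP_eq_of_boundary (l : List Int) (x : Int) (k : Nat) (hk : k ≤ l.length)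
    (h1 : ∀ j (hj : j < l.length), j < k → l[j] < x)
    (h2 : ∀ j (hj : j < l.length), k ≤ j → x ≤ l[j]) :
    l.countP (fun a => decide (a < x)) = k := by
  induction l generalizing k with
  | nil => simpa using (Nat.le_zero.mp (by simpa using hk)).symm
  | cons a t ih =>
    cases k with
    | zero =>
      have ha : ¬ a < x := not_lt.mpr (h2 0 (by simp) (Nat.zero_le _))
      have ht : t.countP (fun a => decide (a < x)) = 0 := by
        apply ih 0 (Nat.zero_le _)
        · intro j hj hj0; omega
        · intro j hj _
          have := h2 (j + 1) (by simpa using Nat.succ_lt_succ hj) (Nat.zero_le _)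
          simpa using this
      simp [List.countP_cons, ha, ht]
    | succ k' =>
      have ha : a < x := h1 0 (by simp) (Nat.succ_pos _)
      have ht : t.countP (fun a => decide (a < x)) = k' := by
        apply ih k' (by simpa using Nat.succ_le_succ_iff.mp hk)
        · intro j hj hjk
          have := h1 (j + 1) (by simpa using Nat.succ_lt_succ hj) (Nat.succ_lt_succ hjk)
          simpa using this
        · intro j hj hjk
          have := h2 (j + 1) (by simpa using Nat.succ_lt_succ hj) (Nat.succ_le_succ hjk)
          simpa using this
      simp [List.countP_cons, ha, ht]

-- On a nondecreasing list, bisect_left returns the number of elements < x.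
lemma bisectLeft_eq_countP (l : List Int) (x : Int) (hs : l.Pairwise (· ≤ ·)) :
    PySem.List.bisectLeft l x = l.countP (fun a => decide (a < x)) := by
  obtain ⟨hle, h1, h2⟩ := PySem.List.bisectLeft_spec l x hs
  exact (countP_eq_of_boundary l x _ hle h1 h2).symm

-- Counting below hi splits at lo.
lemma countP_lt_split (l : List Int) (lo hi : Int) (h : lo ≤ hi) :
    l.countP (fun a => decide (a < hi)) =
      l.countP (fun a => decide (a < lo)) + l.countP (fun a => decide (lo ≤ a ∧ a < hi)) := by
  induction l with
  | nil => simp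
  | cons a t ih =>
    rw [List.countP_cons, List.countP_cons, List.countP_cons, ih]
    by_cases h1 : a < lo <;> by_cases h2 : a < hi
    · rw [if_pos (by simpa using h2), if_pos (by simpa using h1),
        if_neg (by simp; omega)]
      omega
    · exact absurd (lt_of_lt_of_le h1 h) h2
    · rw [if_pos (by simpa using h2), if_neg (by simpa using h1),
        if_pos (by simp; omega)]
      omega
    · rw [if_neg (by simpa using h2), if_neg (by simpa using h1),
        if_neg (by simp; omega)]
      omega

-- A's accumulating loop is the base plus expand_level times the count of hits.
lemma foldl_if_add (rows : List Int) (e lo hi : Int) (acc : Int) :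
    rows.foldl (fun y row => if lo ≤ row ∧ row < hi then y + e else y) acc =
      acc + e * (rows.countP (fun row => decide (lo ≤ row ∧ row < hi)) : Int) := by
  induction rows generalizing acc with
  | nil => simp
  | cons a t ih =>
    simp only [List.foldl_cons, List.countP_cons]
    by_cases h : lo ≤ a ∧ a < hi
    · rw [if_pos h, ih]; simp [h]; push_cast; ring
    · rw [if_neg h, ih]; simp [h]

-- The bisect difference on the sorted list counts the hits of the original list.
lemma bisect_diff_eq_count (l : List Int) (lo hi : Int) (h : lo ≤ hi) :
    (PySem.List.bisectLeft (PySem.List.sorted l (fun r => r) false) hi : Int) -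
      (PySem.List.bisectLeft (PySem.List.sorted l (fun r => r) false) lo : Int) =
      (l.countP (fun row => decide (lo ≤ row ∧ row < hi)) : Int) := by
  set s := PySem.List.sorted l (fun r => r) false with hsdef
  have hs : s.Pairwise (· ≤ ·) := by
    simpa using PySem.List.sorted_pairwise l (fun r => r)
  have hperm : s.Perm l := PySem.List.sorted_perm l (fun r => r) false
  rw [bisectLeft_eq_countP s hi hs, bisectLeft_eq_countP s lo hs,
    hperm.countP_eq, hperm.countP_eq, countP_lt_split l lo hi h]
  push_cast
  have := hperm.countP_eq (fun a => decide (lo ≤ a ∧ a < hi))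
  omega

-- ===== VERDICT (by name: the statement is the Claim_ definition above) =====
theorem calculate_shortest_path_spec : Claim_equal_calculate_shortest_path := by
  intro star expand_level empty_rows empty_columns _ hpre
  unfold Spec_calculate_shortest_path
  match star with
  | (sy, sx) :: (ey, ex) :: rest =>
    have hget0 : PySem.List.pyGet? ((sy, sx) :: (ey, ex) :: rest) 0 = some (sy, sx) := by
      rw [show (0 : Int) = ((0 : Nat) : Int) by norm_num, PySem.List.pyGet?_natCast]; rfl
    have hget1 : PySem.List.pyGet? ((sy, sx) :: (ey, ex) :: rest) 1 = some (ey, ex) := by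
      rw [show (1 : Int) = ((1 : Nat) : Int) by norm_num, PySem.List.pyGet?_natCast]; rfl
    rcases le_or_gt sy ey with hy | hy <;> rcases le_or_gt sx ex with hx | hx
    · simp only [calculate_shortest_path, calculate_shortest_path_alt, hget0, hget1, if_pos hy, if_pos hx]
      rw [foldl_if_add, foldl_if_add,
        bisect_diff_eq_count empty_rows sy ey hy, bisect_diff_eq_count empty_columns sx ex hx,
        abs_of_nonpos (by omega : sy - ey ≤ 0), abs_of_nonpos (by omega : sx - ex ≤ 0)]
      ring
    · simp only [calculate_shortest_path, calculate_shortest_path_alt, hget0, hget1, if_pos hy,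
        if_neg (not_le.mpr hx)]
      rw [foldl_if_add, foldl_if_add,
        bisect_diff_eq_count empty_rows sy ey hy,
        bisect_diff_eq_count empty_columns ex sx (by omega),
        abs_of_nonpos (by omega : sy - ey ≤ 0), abs_of_nonneg (by omega : (0:Int) ≤ sx - ex)]
      ring
    · simp only [calculate_shortest_path, calculate_shortest_path_alt, hget0, hget1,
        if_neg (not_le.mpr hy), if_pos hx]
      rw [foldl_if_add, foldl_if_add,
        bisect_diff_eq_count empty_rows ey sy (by omega),
        bisect_diff_eq_count empty_columns sx ex hx,
        abs_of_nonneg (by omega : (0:Int) ≤ sy - ey), abs_of_nonpos (by omega : sx - ex ≤ 0)]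
      ring
    · simp only [calculate_shortest_path, calculate_shortest_path_alt, hget0, hget1,
        if_neg (not_le.mpr hy), if_neg (not_le.mpr hx)]
      rw [foldl_if_add, foldl_if_add,
        bisect_diff_eq_count empty_rows ey sy (by omega),
        bisect_diff_eq_count empty_columns ex sx (by omega),
        abs_of_nonneg (by omega : (0:Int) ≤ sy - ey), abs_of_nonneg (by omega : (0:Int) ≤ sx - ex)]
      ring
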